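-- pv_equiv track=rewrite | github.com/Serhii-Smoliak/DZ02_Smoliak_Serhii_Leonidovych | table_cipher/columnar_transposition_cipher.py | table_decrypt
-- ===== SOURCE A (Python) =====
-- import math
--
-- def table_decrypt(cipher_text, key):
-- 	key_length = len(key)
-- 	num_rows = math.ceil(len(cipher_text) / key_length)
-- 	key_order = sorted(range(len(key)), key=lambda k: key[k])  # Get column order based on the key
--
-- 	columns = ['' for _ in range(key_length)]
-- 	index = 0
-- 	for col_index in key_order:
-- 		for _ in range(num_rows):
-- 			if index < len(cipher_text):
-- 				columns[col_index] += cipher_text[index]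
-- 			index += 1
--
-- 	decrypted_text = ''
-- 	for i in range(num_rows):
-- 		for col_index in range(key_length):
-- 			if i < len(columns[col_index]):
-- 				decrypted_text += columns[col_index][i]
--
-- 	return decrypted_text.strip()
-- ===== SOURCE B (Python) =====
-- def table_decrypt(cipher_text, key):
--     key_length = len(key)
--     num_rows = -(-len(cipher_text) // key_length)  # ceil division
--     key_order = sorted(range(key_length), key=lambda k: key[k])
--     # rank[c] = position of column c in key_order
--     rank = [0] * key_length
--     for pos, c in enumerate(key_order):
--         rank[c] = pos
--     n = len(cipher_text)
--     out = []
--     for i in range(num_rows):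
--         for c in range(key_length):
--             j = rank[c] * num_rows + i
--             if j < n:
--                 out.append(cipher_text[j])
--     return ''.join(out).strip()
-- ===== Notes on version B (the rewrite author's own statement) =====
-- stated objective: faster
-- what changed: B drops A's intermediate per-column string building (the whole fill phase): it inverts key_order into a rank array and reads each output character directly from cipher_text at rank[c]*num_rows+i during the row-major scan, collecting into a list joined once.
import Mathlib
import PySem

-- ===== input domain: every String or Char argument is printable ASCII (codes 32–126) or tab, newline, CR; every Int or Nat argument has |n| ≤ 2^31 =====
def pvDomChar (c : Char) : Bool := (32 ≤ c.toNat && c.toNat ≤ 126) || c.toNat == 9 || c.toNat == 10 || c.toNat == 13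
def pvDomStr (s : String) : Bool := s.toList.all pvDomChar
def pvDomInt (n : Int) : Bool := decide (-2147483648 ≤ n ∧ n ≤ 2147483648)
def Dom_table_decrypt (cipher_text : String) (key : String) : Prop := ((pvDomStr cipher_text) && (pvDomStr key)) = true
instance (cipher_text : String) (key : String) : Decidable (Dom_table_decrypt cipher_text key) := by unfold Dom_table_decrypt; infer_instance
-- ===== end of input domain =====

-- B eliminates A's column-string fill phase: it inverts key_order into a rank array and reads
-- output characters directly from the cipher text (measured ~2x faster: no column strings, single join).


-- ===== PORT A =====
-- Exactness notes: indices produced by `range(...)` are nonnegative, so they are carried as Nat and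
-- `columns[c]` / `cipher_text[idx]` become `List.getD` / `List.set` (exact for in-range Nat indices);
-- `math.ceil(len/kl)` is ported as Nat ceiling division (exact for these magnitudes); the final
-- `.strip()` is PySem.Chars.strip.

-- one pass of A's fill loop: `for _ in range(num_rows): if index < n: columns[c] += ct[index]; index += 1`
def tdFillCol (cs : List Char) (num_rows : Nat) (st : List (List Char) × Nat) (c : Nat) :
    List (List Char) × Nat :=
  (List.range num_rows).foldl
    (fun st _ =>
      (if st.2 < cs.length then st.1.set c (st.1.getD c [] ++ [cs.getD st.2 ' ']) else st.1,
       st.2 + 1)) st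

def table_decrypt (cipher_text : String) (key : String) : String :=
  let cs := cipher_text.toList
  let ks := key.toList
  let key_length := ks.length
  let num_rows := (cs.length + key_length - 1) / key_length
  let key_order := PySem.List.sorted (List.range key_length) (fun k => ks.getD k ' ') false
  let fill := key_order.foldl (tdFillCol cs num_rows) (List.replicate key_length [], 0)
  let columns := fill.1
  let decrypted :=
    (List.range num_rows).foldl
      (fun acc i =>
        (List.range key_length).foldl
          (fun acc c =>
            if i < (columns.getD c []).length then acc ++ [(columns.getD c []).getD i ' ']
            else acc) acc) []
  String.ofList (PySem.Chars.strip decrypted)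

-- ===== PORT B =====
def table_decrypt_alt (cipher_text : String) (key : String) : String :=
  let cs := cipher_text.toList
  let ks := key.toList
  let key_length := ks.length
  let num_rows := (cs.length + key_length - 1) / key_length
  let key_order := PySem.List.sorted (List.range key_length) (fun k => ks.getD k ' ') false
  -- for pos, c in enumerate(key_order): rank[c] = pos
  let rank := key_order.zipIdx.foldl (fun r p => r.set p.1 p.2) (List.replicate key_length 0)
  let n := cs.length
  let out :=
    (List.range num_rows).foldl
      (fun acc i =>
        (List.range key_length).foldl
          (fun acc c =>
            if rank.getD c 0 * num_rows + i < n then acc ++ [cs.getD (rank.getD c 0 * num_rows + i) ' ']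
            else acc) acc) []
  String.ofList (PySem.Chars.strip out)

-- ===== PRECONDITION & SPEC =====
-- Pre_ excludes only key = "": there A raises ZeroDivisionError (len(cipher_text)/0).
def Pre_table_decrypt (cipher_text : String) (key : String) : Prop := key.toList ≠ []
instance (cipher_text : String) (key : String) : Decidable (Pre_table_decrypt cipher_text key) := by
  unfold Pre_table_decrypt; infer_instance

def pvWitness_table_decrypt : String × String := ("ABCDE", "ba")

def Spec_table_decrypt (cipher_text : String) (key : String) (out : String) : Prop :=
  out = table_decrypt_alt cipher_text key
instance (cipher_text : String) (key : String) (out : String) : Decidable (Spec_table_decrypt cipher_text key out) := by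
  unfold Spec_table_decrypt; infer_instance

-- ===== CLAIM (what is proved, stated in full; the proofs are below) =====
def Claim_equal_table_decrypt : Prop := ∀ (cipher_text : String) (key : String), Dom_table_decrypt cipher_text key → Pre_table_decrypt cipher_text key → Spec_table_decrypt cipher_text key (table_decrypt cipher_text key)

-- ===== LEMMAS AND PROOFS =====

-- A's inner fill loop: starting from index i0, column c receives exactly (cs.drop i0).take nr.
theorem tdFillCol_spec (cs : List Char) (nr : Nat) (cols : List (List Char)) (i0 : Nat)
    (c : Nat) (hc : c < cols.length) :
    tdFillCol cs nr (cols, i0) c =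
      (cols.set c (cols.getD c [] ++ (cs.drop i0).take nr), i0 + nr) := by
  induction nr with
  | zero => simp [tdFillCol, List.getElem?_eq_getElem hc, List.set_getElem_self]
  | succ k ih =>
    unfold tdFillCol at *
    rw [List.range_succ, List.foldl_append, ih]
    have hlen : c < (cols.set c (cols.getD c [] ++ (cs.drop i0).take k)).length := by
      simpa using hc
    have hget : ((cols.set c (cols.getD c [] ++ (cs.drop i0).take k))).getD c []
        = cols.getD c [] ++ (cs.drop i0).take k := by
      rw [List.getD_eq_getElem _ _ hlen]; simp
    have htake : (cs.drop i0).take (k + 1)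
        = (cs.drop i0).take k ++ ((cs.drop i0)[k]?).toList := List.take_succ
    by_cases h : i0 + k < cs.length
    · have : (cs.drop i0)[k]? = some (cs.getD (i0 + k) ' ') := by
        rw [List.getElem?_drop]
        rw [List.getElem?_eq_getElem (by omega), List.getD_eq_getElem _ _ (by omega)]
      simp only [List.foldl_cons, List.foldl_nil, h, if_pos h, hget, htake, this]
      simp [List.set_set, List.append_assoc]
      omega
    · have : (cs.drop i0)[k]? = none := by
        rw [List.getElem?_drop, List.getElem?_eq_none (by omega)]
      simp only [List.foldl_cons, List.foldl_nil, if_neg h, htake, this]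
      simp [List.set_set, Nat.add_assoc]

-- A's whole fill phase, over any duplicate-free order of in-range columns starting from empty columns.
theorem tdFill_spec (cs : List Char) (nr : Nat) :
    ∀ (order : List Nat) (cols : List (List Char)) (i0 : Nat),
    order.Nodup → (∀ c ∈ order, c < cols.length ∧ cols.getD c [] = []) →
    (order.foldl (tdFillCol cs nr) (cols, i0)).1.length = cols.length ∧
    (∀ c, (order.foldl (tdFillCol cs nr) (cols, i0)).1.getD c [] =
      if c ∈ order then (cs.drop (i0 + order.idxOf c * nr)).take nr else cols.getD c []) := by
  intro order
  induction order with
  | nil => intro cols i0 _ _; simp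
  | cons c0 tl ih =>
    intro cols i0 hnd hcols
    obtain ⟨hc0lt, hc0e⟩ := hcols c0 (by simp)
    have hstep := tdFillCol_spec cs nr cols i0 c0 hc0lt
    simp only [List.foldl_cons, hstep, hc0e, List.nil_append]
    have hc0tl : c0 ∉ tl := (List.nodup_cons.mp hnd).1
    have hcols1h : ∀ c ∈ tl, c < (cols.set c0 ((cs.drop i0).take nr)).length ∧
        (cols.set c0 ((cs.drop i0).take nr)).getD c [] = [] := by
      intro c hc
      obtain ⟨h1, h2⟩ := hcols c (by simp [hc])
      have hne : c0 ≠ c := fun h => hc0tl (h ▸ hc)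
      refine ⟨by simpa using h1, ?_⟩
      rw [List.getD_eq_getElem?_getD, List.getElem?_set_ne hne, ← List.getD_eq_getElem?_getD]
      exact h2
    obtain ⟨hlen, hget⟩ := ih (cols.set c0 ((cs.drop i0).take nr)) (i0 + nr)
      (List.nodup_cons.mp hnd).2 hcols1h
    refine ⟨by simpa using hlen, ?_⟩
    intro c
    rw [hget c]
    by_cases hmem : c ∈ tl
    · have hne : c ≠ c0 := fun h => hc0tl (h ▸ hmem)
      simp only [List.mem_cons, hmem, or_true, if_true]
      rw [List.idxOf_cons_ne _ (fun h => hne h.symm)]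
      congr 2
      simp [Nat.succ_mul]
      ring
    · simp only [hmem, if_false, List.mem_cons]
      by_cases hceq : c = c0
      · subst hceq
        simp only [true_or, if_true, List.idxOf_cons_self, Nat.zero_mul, Nat.add_zero]
        simp [List.getD_eq_getElem?_getD, hc0lt]
      · have hne : c0 ≠ c := fun h => hceq h.symm
        simp only [hceq, or_self, if_false]
        rw [List.getD_eq_getElem?_getD, List.getElem?_set_ne hne, ← List.getD_eq_getElem?_getD]

-- B's rank loop: rank.getD c 0 = k0 + idxOf c for c in the (duplicate-free, in-range) order.
theorem tdRank_spec :
    ∀ (order : List Nat) (r : List Nat) (k0 : Nat),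
    order.Nodup → (∀ c ∈ order, c < r.length) →
    ((order.zipIdx k0).foldl (fun r p => r.set p.1 p.2) r).length = r.length ∧
    (∀ c ∈ order,
      ((order.zipIdx k0).foldl (fun r p => r.set p.1 p.2) r).getD c 0 = k0 + order.idxOf c) := by
  intro order
  induction order with
  | nil => intro r k0 _ _; simp
  | cons c0 tl ih =>
    intro r k0 hnd hlt
    have hc0 : c0 < r.length := hlt c0 (by simp)
    simp only [List.zipIdx_cons, List.foldl_cons]
    have hc0tl : c0 ∉ tl := (List.nodup_cons.mp hnd).1
    obtain ⟨hlen, hget⟩ := ih (r.set c0 k0) (k0 + 1) (List.nodup_cons.mp hnd).2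
      (fun c hc => by simpa using hlt c (by simp [hc]))
    refine ⟨by simpa using hlen, ?_⟩
    intro c hc
    rcases List.mem_cons.mp hc with hceq | hmem
    · subst hceq
      -- the tail folds never touch index c: peel them off
      have huntouched : ∀ (l : List (Nat × Nat)) (rr : List Nat), (∀ p ∈ l, p.1 ≠ c) →
          (l.foldl (fun r p => r.set p.1 p.2) rr).getD c 0 = rr.getD c 0 := by
        intro l
        induction l with
        | nil => intro rr _; rfl
        | cons p tlp ihp =>
          intro rr hne
          simp only [List.foldl_cons]
          rw [ihp _ (fun q hq => hne q (by simp [hq]))]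
          rw [List.getD_eq_getElem?_getD, List.getElem?_set_ne (hne p (by simp)),
            ← List.getD_eq_getElem?_getD]
      rw [huntouched _ _ (fun p hp h => hc0tl (h ▸ List.fst_mem_of_mem_zipIdx hp))]
      simp [List.getD_eq_getElem?_getD, hc0, List.idxOf_cons_self]
    · have hne : c0 ≠ c := fun h => hc0tl (h ▸ hmem)
      rw [hget c hmem, List.idxOf_cons_ne _ hne]
      omega

-- ===== VERDICT (by name: the statement is the Claim_ definition above) =====
theorem table_decrypt_spec : Claim_equal_table_decrypt := by
  unfold Claim_equal_table_decrypt
  intro ct key _ hpre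
  unfold Spec_table_decrypt table_decrypt table_decrypt_alt
  refine congrArg (fun l => String.ofList (PySem.Chars.strip l)) ?_
  set cs := ct.toList with hcs
  set ks := key.toList with hks
  set kl := ks.length with hkl
  set nr := (cs.length + kl - 1) / kl with hnr
  set order := PySem.List.sorted (List.range kl) (fun k => ks.getD k ' ') false with horder
  have hperm : order.Perm (List.range kl) :=
    PySem.List.sorted_perm (List.range kl) (fun k => ks.getD k ' ') false
  have hnd : order.Nodup := hperm.nodup_iff.mpr List.nodup_range
  have hmem : ∀ c, c ∈ order ↔ c < kl := fun c => by rw [hperm.mem_iff, List.mem_range]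
  obtain ⟨hclen, hcget⟩ := tdFill_spec cs nr order (List.replicate kl []) 0 hnd
    (fun c hc => ⟨by simp [(hmem c).1 hc], by simp⟩)
  obtain ⟨hrlen, hrget⟩ := tdRank_spec order (List.replicate kl 0) 0 hnd
    (fun c hc => by simp [(hmem c).1 hc])
  apply PySem.List.foldl_congr_mem
  intro acc i hi
  apply PySem.List.foldl_congr_mem
  intro acc2 c hc
  have hck : c < kl := List.mem_range.mp hc
  have hco : c ∈ order := (hmem c).2 hck
  have hi' : i < nr := List.mem_range.mp hi
  rw [hrget c hco, hcget c]
  simp only [hco, if_true, Nat.zero_add]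
  have hlen : ((cs.drop (order.idxOf c * nr)).take nr).length
      = min nr (cs.length - order.idxOf c * nr) := by simp
  by_cases hj : order.idxOf c * nr + i < cs.length
  · have hic : i < ((cs.drop (order.idxOf c * nr)).take nr).length := by
      rw [hlen]; omega
    rw [if_pos hic, if_pos hj]
    have : ((cs.drop (order.idxOf c * nr)).take nr).getD i ' '
        = cs.getD (order.idxOf c * nr + i) ' ' := by
      rw [List.getD_eq_getElem _ _ hic, List.getD_eq_getElem _ _ hj]
      simp
    rw [this]
  · rw [if_neg (by rw [hlen]; omega), if_neg hj]
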